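-- pv_equiv track=rewrite | github.com/nileshsabnis10/deandashboard | 1.py | find_matching_marks_tab
-- ===== SOURCE A (Python) =====
-- from typing import Dict, List, Tuple
-- from typing import Dict, List, Tuple
--
-- def find_matching_marks_tab(component_name: str, all_titles: List[str]) -> str:
--     comp_norm = component_name.lower().strip()
--     titles_norm = {title: title.lower().strip() for title in all_titles}
--
--     # Define search patterns in order of priority
--     patterns = [
--         f"{comp_norm}",
--         f"{comp_norm}_marks",
--         f"{comp_norm} marks",
--         f"marks_{comp_norm}",
--         f"marks {comp_norm}",
--     ]
--
--     # First, check for common, specific patterns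
--     for title, norm_title in titles_norm.items():
--         if norm_title in patterns:
--             return title
--
--     # If no specific pattern found, try a looser search
--     for title, norm_title in titles_norm.items():
--         if comp_norm in norm_title:
--             return title
--
--     return "" # No match found
-- ===== SOURCE B (Python) =====
-- from typing import List
--
--
-- def find_matching_marks_tab(component_name: str, all_titles: List[str]) -> str:
--     comp_norm = component_name.lower().strip()
--     patterns = (
--         f"{comp_norm}",
--         f"{comp_norm}_marks",
--         f"{comp_norm} marks",
--         f"marks_{comp_norm}",
--         f"marks {comp_norm}",
--     )
--     # One pass: remember the first exact-pattern hit and the first substring hit.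
--     first_exact = None
--     first_substring = None
--     for title in all_titles:
--         norm = title.lower().strip()
--         if first_exact is None and norm in patterns:
--             first_exact = title
--         if first_substring is None and comp_norm in norm:
--             first_substring = title
--     if first_exact is not None:
--         return first_exact
--     if first_substring is not None:
--         return first_substring
--     return ""
-- ===== Notes on version B (the rewrite author's own statement) =====
-- stated objective: simpler
-- what changed: Replaces the normalized-title dict plus two sequential scans over its items with a single pass over the title list that tracks the first exact-pattern hit and the first substring hit in two optional variables.
import Mathlib
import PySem

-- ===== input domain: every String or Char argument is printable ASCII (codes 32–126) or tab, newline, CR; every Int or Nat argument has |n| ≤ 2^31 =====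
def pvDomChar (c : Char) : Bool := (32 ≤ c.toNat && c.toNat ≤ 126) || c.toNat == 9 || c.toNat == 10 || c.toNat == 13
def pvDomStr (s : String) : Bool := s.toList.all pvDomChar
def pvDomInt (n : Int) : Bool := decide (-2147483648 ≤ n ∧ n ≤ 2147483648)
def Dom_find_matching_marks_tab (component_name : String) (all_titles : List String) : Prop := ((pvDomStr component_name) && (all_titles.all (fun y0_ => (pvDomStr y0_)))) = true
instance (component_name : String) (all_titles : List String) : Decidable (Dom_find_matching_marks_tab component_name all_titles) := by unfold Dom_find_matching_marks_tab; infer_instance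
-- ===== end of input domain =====

-- B replaces A's normalized-title dict and two sequential scans by one pass tracking
-- the first exact-pattern hit and the first substring hit (objective: simpler).

-- title.lower().strip(), shared normalization step of both programs
def pvNorm (s : String) : String := PySem.Str.strip (PySem.Str.lower s)

def pvPatterns (comp_norm : String) : List String :=
  [comp_norm, comp_norm ++ "_marks", comp_norm ++ " marks",
   "marks_" ++ comp_norm, "marks " ++ comp_norm]

-- ===== PORT A =====
def find_matching_marks_tab (component_name : String) (all_titles : List String) : String :=
  let comp_norm := pvNorm component_name
  let titles_norm : PySem.Dict String String :=
    all_titles.foldl (fun d title => d.insert title (pvNorm title)) PySem.Dict.empty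
  let patterns := pvPatterns comp_norm
  match titles_norm.items.find? (fun p => patterns.contains p.2) with
  | some p => p.1
  | none =>
    match titles_norm.items.find? (fun p => PySem.Str.isIn comp_norm p.2) with
    | some p => p.1
    | none => ""

-- ===== PORT B =====
def find_matching_marks_tab_alt (component_name : String) (all_titles : List String) : String :=
  let comp_norm := pvNorm component_name
  let patterns := pvPatterns comp_norm
  let r : Option String × Option String :=
    all_titles.foldl
      (fun acc title =>
        let norm := pvNorm title
        let e := if acc.1.isNone && patterns.contains norm then some title else acc.1
        let s := if acc.2.isNone && PySem.Str.isIn comp_norm norm then some title else acc.2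
        (e, s))
      (none, none)
  match r.1 with
  | some t => t
  | none =>
    match r.2 with
    | some t => t
    | none => ""

-- ===== PRECONDITION & SPEC =====
def Spec_find_matching_marks_tab (component_name : String) (all_titles : List String) (out : String) : Prop := out = find_matching_marks_tab_alt component_name all_titles
instance (component_name : String) (all_titles : List String) (out : String) : Decidable (Spec_find_matching_marks_tab component_name all_titles out) := by unfold Spec_find_matching_marks_tab; infer_instance

-- ===== CLAIM (what is proved, stated in full; the proofs are below) =====
def Claim_equal_find_matching_marks_tab : Prop := ∀ (component_name : String) (all_titles : List String), Dom_find_matching_marks_tab component_name all_titles → Spec_find_matching_marks_tab component_name all_titles (find_matching_marks_tab component_name all_titles)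

-- ===== LEMMAS AND PROOFS =====

-- A-side: scanning the items of the title→norm dict is scanning the titles themselves
lemma find_items_eq (pred : String → Bool) (xs : List String)
    (d : PySem.Dict String String) (hinv : ∀ p ∈ d.items, p.2 = pvNorm p.1) :
    ((xs.foldl (fun d t => d.insert t (pvNorm t)) d).items.find? (fun p => pred p.2))
      = (d.items.find? (fun p => pred p.2)).or
          ((xs.find? (fun t => pred (pvNorm t))).map (fun t => (t, pvNorm t))) := by
  induction xs generalizing d with
  | nil => simp
  | cons x xs ih =>
    have hinv' : ∀ p ∈ (d.insert x (pvNorm x)).items, p.2 = pvNorm p.1 := by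
      intro p hp
      rcases (PySem.Dict.mem_items_insert _ _ _ p).1 hp with h | h
      · simp [h]
      · exact hinv p h.1
    have step : (d.insert x (pvNorm x)).items.find? (fun p => pred p.2)
        = (d.items.find? (fun p => pred p.2)).or
            (if pred (pvNorm x) then some (x, pvNorm x) else none) := by
      by_cases hc : d.contains x
      · rw [PySem.Dict.items_insert_of_contains _ _ hc]
        have hid : d.items.map (fun p => if p.1 == x then (x, pvNorm x) else p) = d.items := by
          rw [List.map_congr_left (g := id), List.map_id]
          intro p hp
          have hv := hinv p hp
          obtain ⟨pk, pv⟩ := p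
          simp only at hv
          by_cases he : pk = x
          · subst he; simp [hv]
          · simp [he]
        rw [hid]
        have hmem : (x, pvNorm x) ∈ d.items := by
          have hk : x ∈ d.keys := (PySem.Dict.contains_iff_mem_keys d x).1 hc
          simp only [PySem.Dict.keys, List.mem_map] at hk
          obtain ⟨p, hp, hpx⟩ := hk
          have := hinv p hp
          have : p = (x, pvNorm x) := by
            cases p; simp_all
          rwa [this] at hp
        cases hfd : d.items.find? (fun p => pred p.2) with
        | some v => simp
        | none =>
          have := List.find?_eq_none.1 hfd _ hmem
          simp at this
          simp [this]
      · rw [PySem.Dict.items_insert_of_not_contains _ _ (by simpa using hc),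
            List.find?_append]
        congr 1
        by_cases hpx : pred (pvNorm x) <;> simp [hpx]
    rw [List.foldl_cons, ih _ hinv', step, Option.or_assoc]
    congr 1
    rw [List.find?_cons]
    by_cases hpx : pred (pvNorm x) <;> simp [hpx]

-- B-side: the fold's two slots are the first exact hit and the first substring hit
lemma fold_pair_eq (pe ps : String → Bool) (xs : List String)
    (acc : Option String × Option String) :
    xs.foldl
      (fun acc title =>
        ((if acc.1.isNone && pe (pvNorm title) then some title else acc.1),
         (if acc.2.isNone && ps (pvNorm title) then some title else acc.2)))
      acc
    = (acc.1.or (xs.find? (fun t => pe (pvNorm t))),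
       acc.2.or (xs.find? (fun t => ps (pvNorm t)))) := by
  induction xs generalizing acc with
  | nil => simp
  | cons x xs ih =>
    rw [List.foldl_cons, ih]
    obtain ⟨a, b⟩ := acc
    cases a <;> cases b <;>
      by_cases h1 : pe (pvNorm x) <;> by_cases h2 : ps (pvNorm x) <;>
      simp [h1, h2]

-- ===== VERDICT (by name: the statement is the Claim_ definition above) =====
theorem find_matching_marks_tab_spec : Claim_equal_find_matching_marks_tab := by
  intro c ts _
  show find_matching_marks_tab c ts = find_matching_marks_tab_alt c ts
  simp only [find_matching_marks_tab, find_matching_marks_tab_alt]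
  have hemp : ∀ p ∈ (PySem.Dict.empty : PySem.Dict String String).items, p.2 = pvNorm p.1 := by
    intro p hp; simp [PySem.Dict.empty] at hp
  have h1 : ((ts.foldl (fun d t => d.insert t (pvNorm t)) PySem.Dict.empty).items.find?
        (fun p => (pvPatterns (pvNorm c)).contains p.2))
      = ((ts.find? (fun t => (pvPatterns (pvNorm c)).contains (pvNorm t))).map
          (fun t => (t, pvNorm t))) := by
    simpa [PySem.Dict.empty, PySem.Dict.items] using
      find_items_eq (fun s => (pvPatterns (pvNorm c)).contains s) ts PySem.Dict.empty hemp
  have h2 : ((ts.foldl (fun d t => d.insert t (pvNorm t)) PySem.Dict.empty).items.find?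
        (fun p => PySem.Str.isIn (pvNorm c) p.2))
      = ((ts.find? (fun t => PySem.Str.isIn (pvNorm c) (pvNorm t))).map
          (fun t => (t, pvNorm t))) := by
    simpa [PySem.Dict.empty, PySem.Dict.items] using
      find_items_eq (fun s => PySem.Str.isIn (pvNorm c) s) ts PySem.Dict.empty hemp
  have hB : ts.foldl
      (fun (acc : Option String × Option String) title =>
        ((if acc.1.isNone && (pvPatterns (pvNorm c)).contains (pvNorm title) then some title else acc.1),
         (if acc.2.isNone && PySem.Str.isIn (pvNorm c) (pvNorm title) then some title else acc.2)))
      (none, none)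
      = (ts.find? (fun t => (pvPatterns (pvNorm c)).contains (pvNorm t)),
         ts.find? (fun t => PySem.Str.isIn (pvNorm c) (pvNorm t))) := by
    simpa using fold_pair_eq (fun s => (pvPatterns (pvNorm c)).contains s)
      (fun s => PySem.Str.isIn (pvNorm c) s) ts (none, none)
  rw [h1, h2, hB]
  cases ts.find? (fun t => (pvPatterns (pvNorm c)).contains (pvNorm t)) with
  | some t => simp
  | none =>
    cases ts.find? (fun t => PySem.Str.isIn (pvNorm c) (pvNorm t)) with
    | some t => simp
    | none => simp
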